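-- pv_equiv track=rewrite | github.com/Matt-Ung/Hub_Dev | Multi-Agent-WF.py | _planner_work_item_rollup
-- ===== SOURCE A (Python) =====
-- from typing import Any, Dict, List, Tuple, Optional
--
-- def _planner_work_item_rollup(progress: List[Dict[str, Any]]) -> Tuple[str, str, str]:
--     statuses = {str(item.get("stage_name") or ""): str(item.get("status") or "pending") for item in progress}
--     if any(status == "failed" for status in statuses.values()):
--         return "☒", "#a61b29", "blocked"
--     if statuses.get("reporter") == "completed":
--         return "☑", "#1b6e3a", "completed"
--     if statuses.get("reporter") == "running":
--         return "☑", "#0b57d0", "reporting"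
--     if statuses.get("validators") == "completed":
--         return "☑", "#1b6e3a", "validated"
--     if statuses.get("validators") == "running":
--         return "☑", "#0b57d0", "under review"
--     if statuses.get("workers") == "completed":
--         return "☑", "#1b6e3a", "executed"
--     if statuses.get("workers") == "running":
--         return "☐", "#0b57d0", "in execution"
--     if statuses.get("planner") == "completed":
--         return "☐", "#5f6368", "planned"
--     if statuses.get("planner") == "running":
--         return "☐", "#0b57d0", "drafting"
--     if statuses.get("preflight") == "completed":
--         return "☐", "#5f6368", "context ready"
--     if statuses.get("preflight") == "running":
--         return "☐", "#0b57d0", "preflight"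
--     return "☐", "#5f6368", "pending"
-- ===== SOURCE B (Python) =====
-- from typing import Any, Dict, List, Tuple
--
-- _RANK = {
--     ("reporter", "completed"): 1, ("reporter", "running"): 2,
--     ("validators", "completed"): 3, ("validators", "running"): 4,
--     ("workers", "completed"): 5, ("workers", "running"): 6,
--     ("planner", "completed"): 7, ("planner", "running"): 8,
--     ("preflight", "completed"): 9, ("preflight", "running"): 10,
-- }
-- _OUT = [
--     ("\u2612", "#a61b29", "blocked"),
--     ("\u2611", "#1b6e3a", "completed"),
--     ("\u2611", "#0b57d0", "reporting"),
--     ("\u2611", "#1b6e3a", "validated"),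
--     ("\u2611", "#0b57d0", "under review"),
--     ("\u2611", "#1b6e3a", "executed"),
--     ("\u2610", "#0b57d0", "in execution"),
--     ("\u2610", "#5f6368", "planned"),
--     ("\u2610", "#0b57d0", "drafting"),
--     ("\u2610", "#5f6368", "context ready"),
--     ("\u2610", "#0b57d0", "preflight"),
--     ("\u2610", "#5f6368", "pending"),
-- ]
--
-- def _planner_work_item_rollup(progress: List[Dict[str, Any]]) -> Tuple[str, str, str]:
--     # Single reverse scan: the first occurrence of a stage name when walking
--     # backwards is its effective (last-wins) status; map each effective pair to
--     # a numeric severity and keep the minimum, then index the output table.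
--     seen = set()
--     best = 11
--     for item in reversed(progress):
--         stage = str(item.get("stage_name") or "")
--         if stage in seen:
--             continue
--         seen.add(stage)
--         status = str(item.get("status") or "pending")
--         r = 0 if status == "failed" else _RANK.get((stage, status), 11)
--         if r < best:
--             best = r
--     return _OUT[best]
-- ===== Notes on version B (the rewrite author's own statement) =====
-- stated objective: alternative
-- what changed: Replaces the statuses dict plus ten-branch if/return chain with a single reverse scan over progress using a seen-set for last-wins collapsing, mapping each effective (stage, status) pair to a numeric severity rank, keeping the running minimum, and indexing an output table by the best rank.
import Mathlib
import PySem

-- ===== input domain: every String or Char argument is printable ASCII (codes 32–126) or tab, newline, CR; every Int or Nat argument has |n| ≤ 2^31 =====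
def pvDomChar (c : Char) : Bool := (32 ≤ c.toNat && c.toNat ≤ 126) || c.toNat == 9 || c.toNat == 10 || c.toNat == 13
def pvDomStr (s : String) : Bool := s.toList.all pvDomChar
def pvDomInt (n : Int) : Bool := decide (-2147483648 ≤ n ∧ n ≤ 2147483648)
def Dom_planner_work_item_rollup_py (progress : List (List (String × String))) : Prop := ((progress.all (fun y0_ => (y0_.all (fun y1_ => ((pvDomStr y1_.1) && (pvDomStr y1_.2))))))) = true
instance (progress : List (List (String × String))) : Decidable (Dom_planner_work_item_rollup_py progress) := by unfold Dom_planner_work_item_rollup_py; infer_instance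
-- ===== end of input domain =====

-- B replaces A's statuses dict + ten-branch if/return chain by a single reverse scan with a
-- seen-set (last-wins without a dict), a numeric severity rank minimised on the fly, and an
-- output table indexed by the best rank (objective: alternative).


-- shared by both ports: str(item.get("stage_name") or "") and str(item.get("status") or "pending")
-- (item.get = first-match lookup on the item association list; 'x or d' maps None and "" to d)
def pvKeyOf (item : List (String × String)) : String :=
  match item.lookup "stage_name" with
  | some s => if s = "" then "" else s
  | none => ""

def pvStOf (item : List (String × String)) : String :=
  match item.lookup "status" with
  | some s => if s = "" then "pending" else s
  | none => "pending"

-- ===== PORT A =====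
-- the dict comprehension {str(item.get("stage_name") or ""): str(item.get("status") or "pending") for item in progress}
def pvStatuses (progress : List (List (String × String))) : PySem.Dict String String :=
  progress.foldl (fun d item => d.insert (pvKeyOf item) (pvStOf item)) PySem.Dict.empty

def planner_work_item_rollup_py (progress : List (List (String × String))) : String × String × String :=
  let statuses := pvStatuses progress
  if statuses.values.any (fun status => status == "failed") then ("☒", "#a61b29", "blocked")
  else if statuses.get? "reporter" == some "completed" then ("☑", "#1b6e3a", "completed")
  else if statuses.get? "reporter" == some "running" then ("☑", "#0b57d0", "reporting")
  else if statuses.get? "validators" == some "completed" then ("☑", "#1b6e3a", "validated")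
  else if statuses.get? "validators" == some "running" then ("☑", "#0b57d0", "under review")
  else if statuses.get? "workers" == some "completed" then ("☑", "#1b6e3a", "executed")
  else if statuses.get? "workers" == some "running" then ("☐", "#0b57d0", "in execution")
  else if statuses.get? "planner" == some "completed" then ("☐", "#5f6368", "planned")
  else if statuses.get? "planner" == some "running" then ("☐", "#0b57d0", "drafting")
  else if statuses.get? "preflight" == some "completed" then ("☐", "#5f6368", "context ready")
  else if statuses.get? "preflight" == some "running" then ("☐", "#0b57d0", "preflight")
  else ("☐", "#5f6368", "pending")

-- ===== PORT B =====
def pvRankTable : PySem.Dict (String × String) Nat := PySem.Dict.ofList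
  [ (("reporter", "completed"), 1), (("reporter", "running"), 2),
    (("validators", "completed"), 3), (("validators", "running"), 4),
    (("workers", "completed"), 5), (("workers", "running"), 6),
    (("planner", "completed"), 7), (("planner", "running"), 8),
    (("preflight", "completed"), 9), (("preflight", "running"), 10) ]

def pvOutTable : List (String × String × String) :=
  [ ("☒", "#a61b29", "blocked"),
    ("☑", "#1b6e3a", "completed"),
    ("☑", "#0b57d0", "reporting"),
    ("☑", "#1b6e3a", "validated"),
    ("☑", "#0b57d0", "under review"),
    ("☑", "#1b6e3a", "executed"),
    ("☐", "#0b57d0", "in execution"),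
    ("☐", "#5f6368", "planned"),
    ("☐", "#0b57d0", "drafting"),
    ("☐", "#5f6368", "context ready"),
    ("☐", "#0b57d0", "preflight"),
    ("☐", "#5f6368", "pending") ]

-- r = 0 if status == "failed" else _RANK.get((stage, status), 11)
def pvRank (stage status : String) : Nat :=
  if status = "failed" then 0 else pvRankTable.getD (stage, status) 11

-- the 'for item in reversed(progress)' loop, carrying (seen, best)
def pvScan : List (List (String × String)) → PySem.Set String × Nat → PySem.Set String × Nat
  | [], st => st
  | item :: rest, st =>
      let stage := pvKeyOf item
      if PySem.Set.contains st.1 stage then pvScan rest st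
      else
        let r := pvRank stage (pvStOf item)
        pvScan rest (PySem.Set.add st.1 stage, if r < st.2 then r else st.2)

def planner_work_item_rollup_py_alt (progress : List (List (String × String))) : String × String × String :=
  let best := (pvScan progress.reverse (PySem.Set.empty, 11)).2
  PySem.List.pyGetD pvOutTable (best : Int) ("", "", "")

-- ===== PRECONDITION & SPEC =====
def Spec_planner_work_item_rollup_py (progress : List (List (String × String))) (out : String × String × String) : Prop := out = planner_work_item_rollup_py_alt progress
instance (progress : List (List (String × String))) (out : String × String × String) : Decidable (Spec_planner_work_item_rollup_py progress out) := by unfold Spec_planner_work_item_rollup_py; infer_instance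

-- ===== CLAIM (what is proved, stated in full; the proofs are below) =====
def Claim_equal_planner_work_item_rollup_py : Prop := ∀ (progress : List (List (String × String))), Dom_planner_work_item_rollup_py progress → Spec_planner_work_item_rollup_py progress (planner_work_item_rollup_py progress)

-- ===== LEMMAS AND PROOFS =====

-- min-of-ranks fold (the ghost of B's 'best' accumulator)
def pvMfold (init : Nat) (l : List (String × String)) : Nat :=
  l.foldl (fun m p => if pvRank p.1 p.2 < m then pvRank p.1 p.2 else m) init

-- the pairs B's reverse scan actually counts (first occurrence of each unseen key)
def pvCollapse : List (List (String × String)) → PySem.Set String → List (String × String)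
  | [], _ => []
  | item :: rest, seen =>
      if PySem.Set.contains seen (pvKeyOf item) then pvCollapse rest seen
      else (pvKeyOf item, pvStOf item) :: pvCollapse rest (PySem.Set.add seen (pvKeyOf item))

theorem pvScan_snd (L : List (List (String × String))) :
    ∀ (seen : PySem.Set String) (best : Nat),
      (pvScan L (seen, best)).2 = pvMfold best (pvCollapse L seen) := by
  induction L with
  | nil => intro seen best; rfl
  | cons item rest ih =>
      intro seen best
      simp only [pvScan, pvCollapse]
      by_cases h : pvKeyOf item ∈ seen
      · simp [PySem.Set.contains, h, ih]
      · simp [PySem.Set.contains, h, ih, pvMfold]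

theorem pvMfold_le_init (l : List (String × String)) :
    ∀ init, pvMfold init l ≤ init := by
  induction l with
  | nil => intro init; exact le_refl _
  | cons p rest ih =>
      intro init
      simp only [pvMfold, List.foldl_cons]
      exact le_trans (ih _) (by split <;> omega)

theorem pvMfold_le_rank (l : List (String × String)) :
    ∀ init p, p ∈ l → pvMfold init l ≤ pvRank p.1 p.2 := by
  induction l with
  | nil => intro _ _ h; cases h
  | cons q rest ih =>
      intro init p hp
      simp only [pvMfold, List.foldl_cons]
      rcases List.mem_cons.mp hp with h | h
      · subst h
        exact le_trans (pvMfold_le_init rest _) (by split <;> omega)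
      · exact ih _ p h

theorem pvMfold_reached (l : List (String × String)) :
    ∀ init, pvMfold init l = init ∨ ∃ p ∈ l, pvMfold init l = pvRank p.1 p.2 := by
  induction l with
  | nil => intro init; exact Or.inl rfl
  | cons q rest ih =>
      intro init
      simp only [pvMfold, List.foldl_cons]
      rcases ih (if pvRank q.1 q.2 < init then pvRank q.1 q.2 else init) with h | ⟨p, hp, h⟩
      · by_cases hq : pvRank q.1 q.2 < init
        · exact Or.inr ⟨q, List.mem_cons_self .., by rw [if_pos hq] at h ⊢; exact h⟩
        · left; simpa [pvMfold, hq] using h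
      · exact Or.inr ⟨p, List.mem_cons_of_mem _ hp, h⟩

theorem pvMfold_lb (l : List (String × String)) :
    ∀ init r, (∀ p ∈ l, r ≤ pvRank p.1 p.2) → r ≤ init → r ≤ pvMfold init l := by
  induction l with
  | nil => intro init r _ h; exact h
  | cons q rest ih =>
      intro init r hall hinit
      simp only [pvMfold, List.foldl_cons]
      refine ih _ r (fun p hp => hall p (List.mem_cons_of_mem _ hp)) ?_
      have := hall q (List.mem_cons_self ..)
      split <;> omega

theorem pvMfold_eq_of (l : List (String × String)) (i : Nat) (hi : i ≤ 11)
    (hw : i = 11 ∨ ∃ p ∈ l, pvRank p.1 p.2 = i)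
    (hlb : ∀ p ∈ l, i ≤ pvRank p.1 p.2) : pvMfold 11 l = i := by
  refine le_antisymm ?_ (pvMfold_lb l 11 i hlb hi)
  rcases hw with h | ⟨p, hp, h⟩
  · subst h; exact pvMfold_le_init l 11
  · exact h ▸ pvMfold_le_rank l 11 p hp

theorem pvMfold_congr_mem (l₁ l₂ : List (String × String))
    (h : ∀ p, p ∈ l₁ ↔ p ∈ l₂) : pvMfold 11 l₁ = pvMfold 11 l₂ := by
  refine pvMfold_eq_of l₁ (pvMfold 11 l₂) (pvMfold_le_init l₂ 11) ?_ ?_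
  · rcases pvMfold_reached l₂ 11 with h2 | ⟨p, hp, h2⟩
    · exact Or.inl h2
    · exact Or.inr ⟨p, (h p).mpr hp, h2.symm⟩
  · intro p hp
    exact pvMfold_le_rank l₂ 11 p ((h p).mp hp)

-- every rank is 0 on "failed", one of the ten table entries, or 11
theorem pvRank_cases (k v : String) :
    (v = "failed" ∧ pvRank k v = 0) ∨
    (k = "reporter" ∧ v = "completed" ∧ pvRank k v = 1) ∨
    (k = "reporter" ∧ v = "running" ∧ pvRank k v = 2) ∨
    (k = "validators" ∧ v = "completed" ∧ pvRank k v = 3) ∨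
    (k = "validators" ∧ v = "running" ∧ pvRank k v = 4) ∨
    (k = "workers" ∧ v = "completed" ∧ pvRank k v = 5) ∨
    (k = "workers" ∧ v = "running" ∧ pvRank k v = 6) ∨
    (k = "planner" ∧ v = "completed" ∧ pvRank k v = 7) ∨
    (k = "planner" ∧ v = "running" ∧ pvRank k v = 8) ∨
    (k = "preflight" ∧ v = "completed" ∧ pvRank k v = 9) ∨
    (k = "preflight" ∧ v = "running" ∧ pvRank k v = 10) ∨
    pvRank k v = 11 := by
  by_cases hv : v = "failed"
  · exact Or.inl ⟨hv, by simp [pvRank, hv]⟩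
  · unfold pvRank pvRankTable
    rw [show (PySem.Dict.ofList
      [ (("reporter", "completed"), (1:Nat)), (("reporter", "running"), 2),
        (("validators", "completed"), 3), (("validators", "running"), 4),
        (("workers", "completed"), 5), (("workers", "running"), 6),
        (("planner", "completed"), 7), (("planner", "running"), 8),
        (("preflight", "completed"), 9), (("preflight", "running"), 10) ]) = PySem.Dict.mk
      [ (("reporter", "completed"), (1:Nat)), (("reporter", "running"), 2),
        (("validators", "completed"), 3), (("validators", "running"), 4),
        (("workers", "completed"), 5), (("workers", "running"), 6),
        (("planner", "completed"), 7), (("planner", "running"), 8),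
        (("preflight", "completed"), 9), (("preflight", "running"), 10) ] from by decide]
    simp only [PySem.Dict.getD_eq_get?_getD, PySem.Dict.get?_mk_cons, hv, if_false]
    split_ifs with h1 h2 h3 h4 h5 h6 h7 h8 h9 h10 <;>
      simp_all [Prod.ext_iff, PySem.Dict.get?, Option.getD]

-- lookup in the left-fold dict = first matching item of the reversed list
theorem pvStatuses_get? (L : List (List (String × String))) :
    ∀ (d : PySem.Dict String String) (k : String),
      (L.foldl (fun d item => d.insert (pvKeyOf item) (pvStOf item)) d).get? k =
        (match L.reverse.find? (fun item => pvKeyOf item == k) with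
         | some item => some (pvStOf item)
         | none => d.get? k) := by
  induction L with
  | nil => intro d k; rfl
  | cons item rest ih =>
      intro d k
      simp only [List.foldl_cons, List.reverse_cons, List.find?_append]
      rw [ih]
      cases hfind : rest.reverse.find? (fun item => pvKeyOf item == k) with
      | some it => simp [Option.or]
      | none =>
          simp only [Option.or, List.find?]
          by_cases hk : pvKeyOf item = k
          · simp [hk]
          · rw [show (pvKeyOf item == k) = false from beq_eq_false_iff_ne.mpr hk]
            simp [PySem.Dict.get?_insert, Ne.symm hk]

theorem pvMem_collapse (L : List (List (String × String))) :
    ∀ (seen : PySem.Set String) (k v : String),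
      (k, v) ∈ pvCollapse L seen ↔
        k ∉ seen ∧
        (match L.find? (fun item => pvKeyOf item == k) with
         | some item => some (pvStOf item)
         | none => none) = some v := by
  induction L with
  | nil => intro seen k v; simp [pvCollapse]
  | cons item rest ih =>
      intro seen k v
      by_cases hk : pvKeyOf item = k
      · rw [List.find?_cons_of_pos (by simp [hk])]
        by_cases hseen : pvKeyOf item ∈ seen
        · simp only [pvCollapse]
          rw [if_pos (by simp [PySem.Set.contains, hseen])]
          subst hk
          constructor
          · intro hmem; exact absurd ((ih seen _ v).mp hmem).1 (by simp [hseen])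
          · rintro ⟨hc, _⟩; exact absurd hseen hc
        · simp only [pvCollapse]
          rw [if_neg (by simp [PySem.Set.contains, hseen])]
          subst hk
          simp only [List.mem_cons]
          constructor
          · rintro (h | hmem)
            · exact ⟨hseen, by exact congrArg some ((Prod.ext_iff.mp h).2).symm⟩
            · have := ((ih _ _ v).mp hmem).1
              simp [PySem.Set.mem_add] at this
          · rintro ⟨_, hv⟩
            simp only [Option.some.injEq] at hv
            exact Or.inl (by simp [hv])
      · rw [List.find?_cons_of_neg (by simp [hk])]
        by_cases hseen : pvKeyOf item ∈ seen
        · simp only [pvCollapse]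
          rw [if_pos (by simp [PySem.Set.contains, hseen])]
          exact ih seen k v
        · simp only [pvCollapse]
          rw [if_neg (by simp [PySem.Set.contains, hseen])]
          simp only [List.mem_cons]
          rw [ih]
          constructor
          · rintro (h | ⟨hc, hv⟩)
            · exact absurd (Prod.ext_iff.mp h).1 (fun hh => hk hh.symm)
            · exact ⟨fun hm => hc (by simp [PySem.Set.mem_add, hm]), hv⟩
          · rintro ⟨hc, hv⟩
            refine Or.inr ⟨?_, hv⟩
            simp only [PySem.Set.mem_add]
            rintro (h | h)
            · exact hc h
            · exact hk h.symm

theorem pv_nodup_keys (progress : List (List (String × String))) :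
    (pvStatuses progress).keys.Nodup :=
  PySem.Dict.nodup_keys_foldl_insert_key progress pvKeyOf (fun _ item => pvStOf item)
    PySem.Dict.empty (by simp [PySem.Dict.keys_empty])

-- membership in A's dict items = membership in B's counted pairs
theorem pv_items_iff_collapse (progress : List (List (String × String)))
    (p : String × String) :
    p ∈ (pvStatuses progress).items ↔ p ∈ pvCollapse progress.reverse PySem.Set.empty := by
  obtain ⟨k, v⟩ := p
  rw [← PySem.Dict.get?_eq_some_iff_mem_items _ _ _ (pv_nodup_keys progress)]
  rw [pvMem_collapse]
  unfold pvStatuses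
  rw [pvStatuses_get? progress PySem.Dict.empty k]
  constructor
  · intro h
    refine ⟨by simp [PySem.Set.empty], ?_⟩
    cases hf : progress.reverse.find? (fun item => pvKeyOf item == k) with
    | some it => rw [hf] at h; simpa using h
    | none => rw [hf] at h; simp [PySem.Dict.get?_empty] at h
  · rintro ⟨_, h⟩
    cases hf : progress.reverse.find? (fun item => pvKeyOf item == k) with
    | some it => rw [hf] at h; exact h
    | none => rw [hf] at h; simp at h

-- the ten table pairs by priority index
def pvPairOf : Nat → String × String
  | 1 => ("reporter", "completed")
  | 2 => ("reporter", "running")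
  | 3 => ("validators", "completed")
  | 4 => ("validators", "running")
  | 5 => ("workers", "completed")
  | 6 => ("workers", "running")
  | 7 => ("planner", "completed")
  | 8 => ("planner", "running")
  | 9 => ("preflight", "completed")
  | 10 => ("preflight", "running")
  | _ => ("", "")

theorem pvRank_lb (p : String × String) (i : Nat) (hi : i ≤ 11)
    (hnf : p.2 ≠ "failed")
    (hmiss : ∀ j, 1 ≤ j → j < i → p ≠ pvPairOf j) :
    i ≤ pvRank p.1 p.2 := by
  rcases pvRank_cases p.1 p.2 with ⟨hv, hr⟩ | ⟨hk, hv, hr⟩ | ⟨hk, hv, hr⟩ | ⟨hk, hv, hr⟩ |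
    ⟨hk, hv, hr⟩ | ⟨hk, hv, hr⟩ | ⟨hk, hv, hr⟩ | ⟨hk, hv, hr⟩ | ⟨hk, hv, hr⟩ |
    ⟨hk, hv, hr⟩ | ⟨hk, hv, hr⟩ | hr
  · exact absurd hv hnf
  · rw [hr]; by_contra hgt; exact hmiss 1 (by omega) (by omega) (Prod.ext_iff.mpr ⟨hk, hv⟩)
  · rw [hr]; by_contra hgt; exact hmiss 2 (by omega) (by omega) (Prod.ext_iff.mpr ⟨hk, hv⟩)
  · rw [hr]; by_contra hgt; exact hmiss 3 (by omega) (by omega) (Prod.ext_iff.mpr ⟨hk, hv⟩)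
  · rw [hr]; by_contra hgt; exact hmiss 4 (by omega) (by omega) (Prod.ext_iff.mpr ⟨hk, hv⟩)
  · rw [hr]; by_contra hgt; exact hmiss 5 (by omega) (by omega) (Prod.ext_iff.mpr ⟨hk, hv⟩)
  · rw [hr]; by_contra hgt; exact hmiss 6 (by omega) (by omega) (Prod.ext_iff.mpr ⟨hk, hv⟩)
  · rw [hr]; by_contra hgt; exact hmiss 7 (by omega) (by omega) (Prod.ext_iff.mpr ⟨hk, hv⟩)
  · rw [hr]; by_contra hgt; exact hmiss 8 (by omega) (by omega) (Prod.ext_iff.mpr ⟨hk, hv⟩)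
  · rw [hr]; by_contra hgt; exact hmiss 9 (by omega) (by omega) (Prod.ext_iff.mpr ⟨hk, hv⟩)
  · rw [hr]; by_contra hgt; exact hmiss 10 (by omega) (by omega) (Prod.ext_iff.mpr ⟨hk, hv⟩)
  · rw [hr]; omega

-- A's if-chain picks exactly the output row of the least present rank
set_option maxHeartbeats 1600000 in
theorem pvChain_eq (progress : List (List (String × String))) :
    planner_work_item_rollup_py progress =
      PySem.List.pyGetD pvOutTable ((pvMfold 11 (pvStatuses progress).items : Nat) : Int) ("", "", "") := by
  have hnd := pv_nodup_keys progress
  have hget : ∀ k v, (pvStatuses progress).get? k = some v ↔ (k, v) ∈ (pvStatuses progress).items :=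
    fun k v => PySem.Dict.get?_eq_some_iff_mem_items _ k v hnd
  simp only [planner_work_item_rollup_py]
  split_ifs with hF h1 h2 h3 h4 h5 h6 h7 h8 h9 h10
  · -- failed
    simp only [PySem.Dict.values, List.any_eq_true, List.mem_map] at hF
    obtain ⟨v, ⟨p, hp, hpv⟩, hfail⟩ := hF
    rw [pvMfold_eq_of _ 0 (by omega)
      (Or.inr ⟨p, hp, by simp [pvRank, hpv ▸ (beq_iff_eq.mp hfail)]⟩)
      (fun _ _ => Nat.zero_le _)]
    rfl
  all_goals have hnf : ∀ p ∈ (pvStatuses progress).items, p.2 ≠ "failed" :=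
    fun p hp hv => hF (by
      simp only [PySem.Dict.values, List.any_eq_true, List.mem_map]
      exact ⟨p.2, ⟨p, hp, rfl⟩, by simp [hv]⟩)
  · rw [pvMfold_eq_of _ 1 (by omega)
      (Or.inr ⟨pvPairOf 1, (hget _ _).mp (by simpa using h1), by decide⟩)
      (fun p hp => pvRank_lb p 1 (by omega) (hnf p hp)
        (fun j hj1 hji hpj => by omega))]
    rfl
  · rw [pvMfold_eq_of _ 2 (by omega)
      (Or.inr ⟨pvPairOf 2, (hget _ _).mp (by simpa using h2), by decide⟩)
      (fun p hp => pvRank_lb p 2 (by omega) (hnf p hp)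
        (fun j hj1 hji hpj => by
          interval_cases j
          · exact h1 (by simpa using (hget _ _).mpr (by rw [hpj] at hp; exact hp))))]
    rfl
  · rw [pvMfold_eq_of _ 3 (by omega)
      (Or.inr ⟨pvPairOf 3, (hget _ _).mp (by simpa using h3), by decide⟩)
      (fun p hp => pvRank_lb p 3 (by omega) (hnf p hp)
        (fun j hj1 hji hpj => by
          interval_cases j
          · exact h1 (by simpa using (hget _ _).mpr (by rw [hpj] at hp; exact hp))
          · exact h2 (by simpa using (hget _ _).mpr (by rw [hpj] at hp; exact hp))))]
    rfl
  · rw [pvMfold_eq_of _ 4 (by omega)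
      (Or.inr ⟨pvPairOf 4, (hget _ _).mp (by simpa using h4), by decide⟩)
      (fun p hp => pvRank_lb p 4 (by omega) (hnf p hp)
        (fun j hj1 hji hpj => by
          interval_cases j
          · exact h1 (by simpa using (hget _ _).mpr (by rw [hpj] at hp; exact hp))
          · exact h2 (by simpa using (hget _ _).mpr (by rw [hpj] at hp; exact hp))
          · exact h3 (by simpa using (hget _ _).mpr (by rw [hpj] at hp; exact hp))))]
    rfl
  · rw [pvMfold_eq_of _ 5 (by omega)
      (Or.inr ⟨pvPairOf 5, (hget _ _).mp (by simpa using h5), by decide⟩)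
      (fun p hp => pvRank_lb p 5 (by omega) (hnf p hp)
        (fun j hj1 hji hpj => by
          interval_cases j
          · exact h1 (by simpa using (hget _ _).mpr (by rw [hpj] at hp; exact hp))
          · exact h2 (by simpa using (hget _ _).mpr (by rw [hpj] at hp; exact hp))
          · exact h3 (by simpa using (hget _ _).mpr (by rw [hpj] at hp; exact hp))
          · exact h4 (by simpa using (hget _ _).mpr (by rw [hpj] at hp; exact hp))))]
    rfl
  · rw [pvMfold_eq_of _ 6 (by omega)
      (Or.inr ⟨pvPairOf 6, (hget _ _).mp (by simpa using h6), by decide⟩)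
      (fun p hp => pvRank_lb p 6 (by omega) (hnf p hp)
        (fun j hj1 hji hpj => by
          interval_cases j
          · exact h1 (by simpa using (hget _ _).mpr (by rw [hpj] at hp; exact hp))
          · exact h2 (by simpa using (hget _ _).mpr (by rw [hpj] at hp; exact hp))
          · exact h3 (by simpa using (hget _ _).mpr (by rw [hpj] at hp; exact hp))
          · exact h4 (by simpa using (hget _ _).mpr (by rw [hpj] at hp; exact hp))
          · exact h5 (by simpa using (hget _ _).mpr (by rw [hpj] at hp; exact hp))))]
    rfl
  · rw [pvMfold_eq_of _ 7 (by omega)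
      (Or.inr ⟨pvPairOf 7, (hget _ _).mp (by simpa using h7), by decide⟩)
      (fun p hp => pvRank_lb p 7 (by omega) (hnf p hp)
        (fun j hj1 hji hpj => by
          interval_cases j
          · exact h1 (by simpa using (hget _ _).mpr (by rw [hpj] at hp; exact hp))
          · exact h2 (by simpa using (hget _ _).mpr (by rw [hpj] at hp; exact hp))
          · exact h3 (by simpa using (hget _ _).mpr (by rw [hpj] at hp; exact hp))
          · exact h4 (by simpa using (hget _ _).mpr (by rw [hpj] at hp; exact hp))
          · exact h5 (by simpa using (hget _ _).mpr (by rw [hpj] at hp; exact hp))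
          · exact h6 (by simpa using (hget _ _).mpr (by rw [hpj] at hp; exact hp))))]
    rfl
  · rw [pvMfold_eq_of _ 8 (by omega)
      (Or.inr ⟨pvPairOf 8, (hget _ _).mp (by simpa using h8), by decide⟩)
      (fun p hp => pvRank_lb p 8 (by omega) (hnf p hp)
        (fun j hj1 hji hpj => by
          interval_cases j
          · exact h1 (by simpa using (hget _ _).mpr (by rw [hpj] at hp; exact hp))
          · exact h2 (by simpa using (hget _ _).mpr (by rw [hpj] at hp; exact hp))
          · exact h3 (by simpa using (hget _ _).mpr (by rw [hpj] at hp; exact hp))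
          · exact h4 (by simpa using (hget _ _).mpr (by rw [hpj] at hp; exact hp))
          · exact h5 (by simpa using (hget _ _).mpr (by rw [hpj] at hp; exact hp))
          · exact h6 (by simpa using (hget _ _).mpr (by rw [hpj] at hp; exact hp))
          · exact h7 (by simpa using (hget _ _).mpr (by rw [hpj] at hp; exact hp))))]
    rfl
  · rw [pvMfold_eq_of _ 9 (by omega)
      (Or.inr ⟨pvPairOf 9, (hget _ _).mp (by simpa using h9), by decide⟩)
      (fun p hp => pvRank_lb p 9 (by omega) (hnf p hp)
        (fun j hj1 hji hpj => by
          interval_cases j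
          · exact h1 (by simpa using (hget _ _).mpr (by rw [hpj] at hp; exact hp))
          · exact h2 (by simpa using (hget _ _).mpr (by rw [hpj] at hp; exact hp))
          · exact h3 (by simpa using (hget _ _).mpr (by rw [hpj] at hp; exact hp))
          · exact h4 (by simpa using (hget _ _).mpr (by rw [hpj] at hp; exact hp))
          · exact h5 (by simpa using (hget _ _).mpr (by rw [hpj] at hp; exact hp))
          · exact h6 (by simpa using (hget _ _).mpr (by rw [hpj] at hp; exact hp))
          · exact h7 (by simpa using (hget _ _).mpr (by rw [hpj] at hp; exact hp))
          · exact h8 (by simpa using (hget _ _).mpr (by rw [hpj] at hp; exact hp))))]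
    rfl
  · rw [pvMfold_eq_of _ 10 (by omega)
      (Or.inr ⟨pvPairOf 10, (hget _ _).mp (by simpa using h10), by decide⟩)
      (fun p hp => pvRank_lb p 10 (by omega) (hnf p hp)
        (fun j hj1 hji hpj => by
          interval_cases j
          · exact h1 (by simpa using (hget _ _).mpr (by rw [hpj] at hp; exact hp))
          · exact h2 (by simpa using (hget _ _).mpr (by rw [hpj] at hp; exact hp))
          · exact h3 (by simpa using (hget _ _).mpr (by rw [hpj] at hp; exact hp))
          · exact h4 (by simpa using (hget _ _).mpr (by rw [hpj] at hp; exact hp))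
          · exact h5 (by simpa using (hget _ _).mpr (by rw [hpj] at hp; exact hp))
          · exact h6 (by simpa using (hget _ _).mpr (by rw [hpj] at hp; exact hp))
          · exact h7 (by simpa using (hget _ _).mpr (by rw [hpj] at hp; exact hp))
          · exact h8 (by simpa using (hget _ _).mpr (by rw [hpj] at hp; exact hp))
          · exact h9 (by simpa using (hget _ _).mpr (by rw [hpj] at hp; exact hp))))]
    rfl
  · rw [pvMfold_eq_of _ 11 (by omega) (Or.inl rfl)
      (fun p hp => pvRank_lb p 11 (by omega) (hnf p hp)
        (fun j hj1 hji hpj => by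
          interval_cases j
          · exact h1 (by simpa using (hget _ _).mpr (by rw [hpj] at hp; exact hp))
          · exact h2 (by simpa using (hget _ _).mpr (by rw [hpj] at hp; exact hp))
          · exact h3 (by simpa using (hget _ _).mpr (by rw [hpj] at hp; exact hp))
          · exact h4 (by simpa using (hget _ _).mpr (by rw [hpj] at hp; exact hp))
          · exact h5 (by simpa using (hget _ _).mpr (by rw [hpj] at hp; exact hp))
          · exact h6 (by simpa using (hget _ _).mpr (by rw [hpj] at hp; exact hp))
          · exact h7 (by simpa using (hget _ _).mpr (by rw [hpj] at hp; exact hp))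
          · exact h8 (by simpa using (hget _ _).mpr (by rw [hpj] at hp; exact hp))
          · exact h9 (by simpa using (hget _ _).mpr (by rw [hpj] at hp; exact hp))
          · exact h10 (by simpa using (hget _ _).mpr (by rw [hpj] at hp; exact hp))))]
    rfl

-- ===== VERDICT (by name: the statement is the Claim_ definition above) =====
theorem planner_work_item_rollup_py_spec : Claim_equal_planner_work_item_rollup_py := by
  intro progress _
  unfold Spec_planner_work_item_rollup_py
  rw [pvChain_eq]
  simp only [planner_work_item_rollup_py_alt]
  rw [pvScan_snd]
  rw [pvMfold_congr_mem _ _ (fun p => (pv_items_iff_collapse progress p))]
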